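-- pv_equiv track=rewrite | github.com/HolyJack/StaticCodeAnalyzer | code_analyzer.py | style_error_003
-- ===== SOURCE A (Python) =====
-- def find_comment_pos(line):
--     quote, ignore, skip = None, False, False
--
--     for i, c in enumerate(line):
--         if skip:
--             skip = False
--             continue
--
--         if c == '\\':
--             skip = True
--             continue
--
--         if not ignore and (c == '"' or c == "'"):
--             quote, ignore = c, True
--         elif not ignore and c == '#':
--             return i
--         elif ignore and c == quote:
--             quote, ignore = None, False
--
--     return -1
--
-- def style_error_003(line):
--     pos = find_comment_pos(line)
--
--     if pos != -1:
--         line = line[:pos]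
--     line = line[::-1]
--
--     for c in line:
--         if c == ';':
--             return True
--         elif c != ' ':
--             return False
--
--     return False
-- ===== SOURCE B (Python) =====
-- def style_error_003(line):
--     # one forward pass: track the last non-space character before a real comment
--     quote, ignore, skip = None, False, False
--     last = None
--     for c in line:
--         if skip:
--             skip = False
--         elif c == '\\':
--             skip = True
--         elif not ignore and (c == '"' or c == "'"):
--             quote, ignore = c, True
--         elif not ignore and c == '#':
--             break
--         elif ignore and c == quote:
--             quote, ignore = None, False
--         if c != ' ':
--             last = c
--     return last == ';'
-- ===== Notes on version B (the rewrite author's own statement) =====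
-- stated objective: simpler
-- what changed: Fused A's three phases (full comment-position scan, slice, reversed trailing scan) into a single forward pass that breaks at a real comment and tracks the most recent non-space character.
import Mathlib
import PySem

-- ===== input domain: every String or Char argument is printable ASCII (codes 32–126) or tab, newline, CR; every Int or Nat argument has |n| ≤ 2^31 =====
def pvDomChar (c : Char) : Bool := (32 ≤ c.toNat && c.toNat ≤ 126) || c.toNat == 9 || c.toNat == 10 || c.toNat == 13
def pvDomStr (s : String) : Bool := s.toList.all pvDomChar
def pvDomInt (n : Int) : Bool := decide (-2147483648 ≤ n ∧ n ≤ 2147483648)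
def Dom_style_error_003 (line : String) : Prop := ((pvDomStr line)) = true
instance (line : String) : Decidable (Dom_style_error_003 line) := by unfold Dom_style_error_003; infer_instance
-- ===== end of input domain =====

-- B fuses A's three phases (comment scan, slice, reversed trailing scan) into one forward pass; simpler, same O(n) cost.

-- ===== PORT A =====
-- find_comment_pos: enumerate with index i, state (quote, ignore, skip)
def fcpLoop : List Char → Nat → Option Char → Bool → Bool → Int
  | [], _, _, _, _ => -1
  | c :: rest, i, quote, ignore, skip =>
    if skip then fcpLoop rest (i+1) quote ignore false
    else if c = '\\' then fcpLoop rest (i+1) quote ignore true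
    else if !ignore && (c = '"' || c = '\'') then fcpLoop rest (i+1) (some c) true false
    else if !ignore && c = '#' then (i : Int)
    else if ignore && quote = some c then fcpLoop rest (i+1) none false false
    else fcpLoop rest (i+1) quote ignore skip

def find_comment_pos (line : String) : Int := fcpLoop line.toList 0 none false false

-- the 'for c in line: if c == ';': return True elif c != ' ': return False / return False' loop
def trailLoop : List Char → Bool
  | [] => false
  | c :: rest => if c = ';' then true else if c ≠ ' ' then false else trailLoop rest

def style_error_003 (line : String) : Bool :=
  let pos := find_comment_pos line
  -- line[:pos] : pos is either -1 (no slicing) or a valid non-negative index, so take pos.toNat is exact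
  let cut := if pos ≠ -1 then line.toList.take pos.toNat else line.toList
  -- line[::-1] then the scan
  trailLoop cut.reverse

-- ===== PORT B =====
-- single forward pass: same quote/ignore/skip machine, plus 'last' = most recent non-space char
def altLoop : List Char → Option Char → Bool → Bool → Option Char → Bool
  | [], _, _, _, last => last == some ';'
  | c :: rest, quote, ignore, skip, last =>
    let last' := if c ≠ ' ' then some c else last
    if skip then altLoop rest quote ignore false last'
    else if c = '\\' then altLoop rest quote ignore true last'
    else if !ignore && (c = '"' || c = '\'') then altLoop rest (some c) true false last'
    else if !ignore && c = '#' then last == some ';'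
    else if ignore && quote = some c then altLoop rest none false false last'
    else altLoop rest quote ignore skip last'

def style_error_003_alt (line : String) : Bool := altLoop line.toList none false false none

-- ===== PRECONDITION & SPEC =====
def Spec_style_error_003 (line : String) (out : Bool) : Prop := out = style_error_003_alt line
instance (line : String) (out : Bool) : Decidable (Spec_style_error_003 line out) := by unfold Spec_style_error_003; infer_instance

-- ===== CLAIM (what is proved, stated in full; the proofs are below) =====
def Claim_equal_style_error_003 : Prop := ∀ (line : String), Dom_style_error_003 line → Spec_style_error_003 line (style_error_003 line)

-- ===== LEMMAS AND PROOFS =====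

-- the prefix of cs strictly before the comment position (all of cs if there is none)
def cutPfx : List Char → Option Char → Bool → Bool → List Char
  | [], _, _, _ => []
  | c :: rest, quote, ignore, skip =>
    if skip then c :: cutPfx rest quote ignore false
    else if c = '\\' then c :: cutPfx rest quote ignore true
    else if !ignore && (c = '"' || c = '\'') then c :: cutPfx rest (some c) true false
    else if !ignore && c = '#' then []
    else if ignore && quote = some c then c :: cutPfx rest none false false
    else c :: cutPfx rest quote ignore skip

-- trailLoop with a fallback accumulator when the reversed list is exhausted
def revScan : List Char → Option Char → Bool
  | [], last => last == some ';'
  | c :: rest, last => if c = ';' then true else if c ≠ ' ' then false else revScan rest last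

theorem fcp_cut (cs : List Char) : ∀ (i : Nat) (q : Option Char) (ig sk : Bool),
    (fcpLoop cs i q ig sk = -1 ∧ cutPfx cs q ig sk = cs) ∨
    (∃ p : Nat, fcpLoop cs i q ig sk = (i : Int) + (p : Int) ∧ cutPfx cs q ig sk = cs.take p) := by
  induction cs with
  | nil => intro i q ig sk; left; exact ⟨rfl, rfl⟩
  | cons c rest ih =>
    intro i q ig sk
    simp only [fcpLoop, cutPfx]
    split_ifs with h1 h2 h3 h4 h5
    · rcases ih (i+1) q ig false with ⟨e, hc⟩ | ⟨p, e, hc⟩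
      · left; exact ⟨e, by rw [hc]⟩
      · right; exact ⟨p+1, by rw [e]; push_cast; ring, by rw [hc]; rfl⟩
    · rcases ih (i+1) q ig true with ⟨e, hc⟩ | ⟨p, e, hc⟩
      · left; exact ⟨e, by rw [hc]⟩
      · right; exact ⟨p+1, by rw [e]; push_cast; ring, by rw [hc]; rfl⟩
    · rcases ih (i+1) (some c) true false with ⟨e, hc⟩ | ⟨p, e, hc⟩
      · left; exact ⟨e, by rw [hc]⟩
      · right; exact ⟨p+1, by rw [e]; push_cast; ring, by rw [hc]; rfl⟩
    · right; exact ⟨0, by push_cast; ring, rfl⟩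
    · rcases ih (i+1) none false false with ⟨e, hc⟩ | ⟨p, e, hc⟩
      · left; exact ⟨e, by rw [hc]⟩
      · right; exact ⟨p+1, by rw [e]; push_cast; ring, by rw [hc]; rfl⟩
    · rcases ih (i+1) q ig sk with ⟨e, hc⟩ | ⟨p, e, hc⟩
      · left; exact ⟨e, by rw [hc]⟩
      · right; exact ⟨p+1, by rw [e]; push_cast; ring, by rw [hc]; rfl⟩

theorem trailLoop_eq_revScan (l : List Char) : trailLoop l = revScan l none := by
  induction l with
  | nil => rfl
  | cons c rest ih => simp only [trailLoop, revScan, ih]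

theorem revScan_append_single (xs : List Char) (c : Char) (last : Option Char) :
    revScan (xs ++ [c]) last = revScan xs (if c ≠ ' ' then some c else last) := by
  induction xs generalizing last with
  | nil =>
    simp only [List.nil_append, revScan]
    by_cases h1 : c = ';'
    · simp [h1]
    · by_cases h2 : c = ' ' <;> simp [h1, h2]
  | cons x xs ih =>
    simp only [List.cons_append, revScan, ih]

theorem alt_eq_revScan (cs : List Char) : ∀ (q : Option Char) (ig sk : Bool) (last : Option Char),
    altLoop cs q ig sk last = revScan (cutPfx cs q ig sk).reverse last := by
  induction cs with
  | nil => intro q ig sk last; rfl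
  | cons c rest ih =>
    intro q ig sk last
    simp only [altLoop, cutPfx]
    split_ifs with h1 h2 h3 h4 h5 <;>
      simp only [List.reverse_cons, List.reverse_nil, revScan, revScan_append_single, ih] <;>
      split_ifs <;> simp_all

-- ===== VERDICT (by name: the statement is the Claim_ definition above) =====
theorem style_error_003_spec : Claim_equal_style_error_003 := by
  intro line _
  unfold Spec_style_error_003 style_error_003 style_error_003_alt find_comment_pos
  dsimp only
  rw [alt_eq_revScan]
  rcases fcp_cut line.toList 0 none false false with ⟨e, hc⟩ | ⟨p, e, hc⟩
  · simp only [e, hc, ne_eq, not_true_eq_false, if_false, trailLoop_eq_revScan]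
  · push_cast at e
    rw [e]
    have hne : ((0 : Int) + (p : Int)) ≠ -1 := by omega
    rw [if_pos hne]
    have htn : ((0 : Int) + (p : Int)).toNat = p := by omega
    rw [htn, hc, trailLoop_eq_revScan]
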